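-- pv_equiv track=rewrite | github.com/Hulyamr13/hackerrank | Permutationgame.py | permutationGame
-- ===== SOURCE A (Python) =====
-- def permutationGame(arr):
--     # Write your code here
--     def canWin(arr):
--         if sorted(arr) == arr:
--             return False
--
--         if tuple(arr) in memo:
--             return memo[tuple(arr)]
--
--         for i in range(len(arr)):
--             temp = arr[:i] + arr[i + 1:]
--             if not canWin(temp):
--                 memo[tuple(arr)] = True
--                 return True
--
--         memo[tuple(arr)] = False
--         return False
--
--     memo = {}
--     return "Alice" if canWin(arr) else "Bob"
-- ===== SOURCE B (Python) =====
-- def permutationGame(arr):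
--     a = tuple(arr)
--     # enumerate all subsequences, then process them in increasing length order (bottom-up DP)
--     subs = [()]
--     for x in a:
--         subs = subs + [s + (x,) for s in subs]
--     subs.sort(key=len)
--     winner = {}
--     for s in subs:
--         if list(s) == sorted(s):
--             winner[s] = False
--         else:
--             winner[s] = any(not winner[s[:i] + s[i + 1:]] for i in range(len(s)))
--     return "Alice" if winner[a] else "Bob"
-- ===== Notes on version B (the rewrite author's own statement) =====
-- stated objective: alternative
-- what changed: Replaces A's top-down memoized recursion with a bottom-up DP: enumerate every subsequence of arr, process them in increasing length order, tabulating winner[sub] (loss iff sorted, else win iff some one-element removal is a recorded loss), then read off winner[tuple(arr)].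
import Mathlib
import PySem

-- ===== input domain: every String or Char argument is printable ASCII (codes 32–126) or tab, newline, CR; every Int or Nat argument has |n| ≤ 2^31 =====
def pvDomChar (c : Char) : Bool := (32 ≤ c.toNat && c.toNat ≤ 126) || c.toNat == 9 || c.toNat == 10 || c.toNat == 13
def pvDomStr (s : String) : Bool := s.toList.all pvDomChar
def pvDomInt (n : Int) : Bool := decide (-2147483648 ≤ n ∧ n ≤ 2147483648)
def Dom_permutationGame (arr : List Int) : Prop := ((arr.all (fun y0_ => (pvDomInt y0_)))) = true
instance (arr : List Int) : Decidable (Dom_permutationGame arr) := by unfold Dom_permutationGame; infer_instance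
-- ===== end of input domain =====

-- B replaces A's top-down memoized recursion by a bottom-up DP over all subsequences in
-- increasing length order (objective: alternative decomposition, same exponential cost).

-- ===== PORT A =====
-- A's inner `canWin` with the memo dict threaded through.  The extra Nat argument is FUEL
-- (at every call it exceeds the list's length, so the 0 branch is unreachable); it only
-- makes the mutual recursion structurally terminating and adds no behaviour.
mutual
def pvCanWinA : Nat → List Int → PySem.Dict (List Int) Bool → Bool × PySem.Dict (List Int) Bool
  | 0, _, memo => (false, memo)          -- dead fuel branch
  | n + 1, arr, memo =>
    if PySem.List.sorted arr (fun x => x) = arr then (false, memo)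
    else
      match memo.get? arr with
      | some b => (b, memo)              -- `if tuple(arr) in memo: return memo[tuple(arr)]`
      | none => pvLoopA n arr (List.range arr.length) memo
termination_by n _ _ => (n, 0)
decreasing_by all_goals (simp_wf; omega)

-- `for i in range(len(arr)): …` with early return, else fall through to `memo[...] = False`
def pvLoopA : Nat → List Int → List Nat → PySem.Dict (List Int) Bool → Bool × PySem.Dict (List Int) Bool
  | _, arr, [], memo => (false, memo.insert arr false)
  | n, arr, i :: rest, memo =>
    let temp := PySem.List.slice arr none (some (i : Int)) ++
                PySem.List.slice arr (some ((i : Int) + 1)) none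
    let r := pvCanWinA n temp memo
    if !r.1 then (true, r.2.insert arr true)
    else pvLoopA n arr rest r.2
termination_by n _ idxs _ => (n, idxs.length + 1)
decreasing_by all_goals (simp_wf; omega)
end

def permutationGame (arr : List Int) : String :=
  if (pvCanWinA (arr.length + 1) arr PySem.Dict.empty).1 then "Alice" else "Bob"

-- ===== PORT B =====
-- one step of Source B's tabulation loop: record winner[s]
def pvStepB (w : PySem.Dict (List Int) Bool) (s : List Int) : PySem.Dict (List Int) Bool :=
  if s = PySem.List.sorted s (fun x => x) then w.insert s false
  else w.insert s ((List.range s.length).any fun i =>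
    !(w.getD (PySem.List.slice s none (some (i : Int)) ++
              PySem.List.slice s (some ((i : Int) + 1)) none) false))

def permutationGame_alt (arr : List Int) : String :=
  -- subs = [()] ; for x in a: subs = subs + [s + (x,) for s in subs]
  let subs := arr.foldl (fun subs x => subs ++ subs.map (fun s => s ++ [x])) [([] : List Int)]
  -- subs.sort(key=len)
  let subs := PySem.List.sorted subs (fun s => (s.length : Int))
  let winner := subs.foldl pvStepB PySem.Dict.empty
  -- winner[a]: the lookup always hits (arr is a subsequence of itself), so getD's default is dead
  if winner.getD arr false then "Alice" else "Bob"

-- ===== PRECONDITION & SPEC =====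
def Spec_permutationGame (arr : List Int) (out : String) : Prop := out = permutationGame_alt arr
instance (arr : List Int) (out : String) : Decidable (Spec_permutationGame arr out) := by unfold Spec_permutationGame; infer_instance

-- ===== CLAIM (what is proved, stated in full; the proofs are below) =====
def Claim_equal_permutationGame : Prop := ∀ (arr : List Int), Dom_permutationGame arr → Spec_permutationGame arr (permutationGame arr)

-- ===== LEMMAS AND PROOFS =====

-- The mathematical game value both programs compute.
def pvWin (l : List Int) : Bool :=
  if PySem.List.sorted l (fun x => x) = l then false
  else (List.range l.length).attach.any (fun i => !pvWin (l.eraseIdx i.1))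
termination_by l.length
decreasing_by
  have : i.1 < l.length := List.mem_range.mp i.2
  simp [List.length_eraseIdx, this]
  omega

lemma pvWin_eq (l : List Int) :
    pvWin l = if PySem.List.sorted l (fun x => x) = l then false
              else (List.range l.length).any (fun i => !pvWin (l.eraseIdx i)) := by
  rw [pvWin]
  split
  · rfl
  · conv_rhs => rw [← List.attach_map_subtype_val (List.range l.length)]
    rw [List.any_map]
    rfl

lemma pvTemp_eq (l : List Int) (i : Nat) :
    PySem.List.slice l none (some (i : Int)) ++
      PySem.List.slice l (some ((i : Int) + 1)) none = l.eraseIdx i := by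
  have h1 : ((i : Int) + 1) = ((i + 1 : Nat) : Int) := by push_cast; ring
  rw [PySem.List.slice_to_natCast, h1, PySem.List.slice_from_natCast,
    List.eraseIdx_eq_take_drop_succ]

def pvSound (d : PySem.Dict (List Int) Bool) : Prop :=
  ∀ k b, d.get? k = some b → b = pvWin k

lemma pvSound_insert_win (d : PySem.Dict (List Int) Bool) (k : List Int) (v : Bool)
    (h : pvSound d) (hv : v = pvWin k) : pvSound (d.insert k v) := by
  intro k' b hb
  rw [PySem.Dict.get?_insert] at hb
  split at hb
  · cases hb; subst ‹k' = k›; exact hv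
  · exact h k' b hb

lemma pvLoopA_spec (n : Nat) (arr : List Int)
    (IH : ∀ t m', t.length < n → pvSound m' →
          (pvCanWinA n t m').1 = pvWin t ∧ pvSound (pvCanWinA n t m').2)
    (hs : ¬ PySem.List.sorted arr (fun x => x) = arr)
    (hn : arr.length ≤ n) :
    ∀ (idxs : List Nat) (memo : PySem.Dict (List Int) Bool),
    (∀ i ∈ idxs, i < arr.length) →
    (∀ j, j < arr.length → j ∉ idxs → pvWin (arr.eraseIdx j) = true) →
    pvSound memo →
    (pvLoopA n arr idxs memo).1 = pvWin arr ∧ pvSound (pvLoopA n arr idxs memo).2 := by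
  have hnil : arr ≠ [] := by
    intro h; subst h; exact hs ((PySem.List.sorted_eq_nil_iff [] (fun x => x) false).mpr rfl)
  intro idxs
  induction idxs with
  | nil =>
    intro memo _ hprev hsound
    have hwin : pvWin arr = false := by
      rw [pvWin_eq, if_neg hs]
      simp only [List.any_eq_false, List.mem_range]
      intro i hi
      simp [hprev i hi (List.not_mem_nil)]
    simp only [pvLoopA]
    exact ⟨hwin.symm, pvSound_insert_win memo arr false hsound hwin.symm⟩
  | cons i rest ih =>
    intro memo hidx hprev hsound
    have hi : i < arr.length := hidx i (by simp)
    have hlt : (arr.eraseIdx i).length < n := by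
      have := List.length_eraseIdx (l := arr) (i := i)
      rw [if_pos hi] at this
      have h1 : 1 ≤ arr.length := by
        cases arr with
        | nil => exact absurd rfl hnil
        | cons a t => simp
      omega
    obtain ⟨h1, h2⟩ := IH (arr.eraseIdx i) memo hlt hsound
    simp only [pvLoopA, pvTemp_eq]
    cases hc : (pvCanWinA n (arr.eraseIdx i) memo).1 with
    | false =>
      have hwf : pvWin (arr.eraseIdx i) = false := by rw [← h1, hc]
      have hwin : pvWin arr = true := by
        rw [pvWin_eq, if_neg hs]
        simp only [List.any_eq_true, List.mem_range]
        exact ⟨i, hi, by simp [hwf]⟩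
      simp only [Bool.not_false, if_pos]
      exact ⟨hwin.symm,
        pvSound_insert_win _ arr true h2 hwin.symm⟩
    | true =>
      have hwt : pvWin (arr.eraseIdx i) = true := by rw [← h1, hc]
      simp only [Bool.not_true, Bool.false_eq_true, if_false]
      exact ih (pvCanWinA n (arr.eraseIdx i) memo).2
        (fun j hj => hidx j (by simp [hj]))
        (fun j hj hnj => by
          by_cases hji : j = i
          · subst hji; exact hwt
          · exact hprev j hj (by simp [hji, hnj]))
        h2

lemma pvCanWinA_spec : ∀ (n : Nat) (arr : List Int) (memo : PySem.Dict (List Int) Bool),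
    arr.length < n → pvSound memo →
    (pvCanWinA n arr memo).1 = pvWin arr ∧ pvSound (pvCanWinA n arr memo).2 := by
  intro n
  induction n with
  | zero => intro arr memo h; omega
  | succ n ih =>
    intro arr memo hlen hsound
    simp only [pvCanWinA]
    by_cases hs : PySem.List.sorted arr (fun x => x) = arr
    · rw [if_pos hs]
      exact ⟨by rw [pvWin_eq, if_pos hs], hsound⟩
    · rw [if_neg hs]
      cases hm : memo.get? arr with
      | some b => exact ⟨hsound arr b hm, hsound⟩
      | none =>
        exact pvLoopA_spec n arr ih hs (by omega) (List.range arr.length) memo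
          (fun i hi => List.mem_range.mp hi)
          (fun j hj hnj => absurd (List.mem_range.mpr hj) hnj)
          hsound

lemma pvA_eq_win (arr : List Int) :
    permutationGame arr = if pvWin arr then "Alice" else "Bob" := by
  have h := pvCanWinA_spec (arr.length + 1) arr PySem.Dict.empty (by omega)
    (by intro k b hb; simp [PySem.Dict.get?_empty] at hb)
  unfold permutationGame
  rw [h.1]

-- membership in Source B's doubling enumeration = being a subsequence
lemma pvSubs_mem (l : List Int) : ∀ (acc : List (List Int)) (s : List Int),
    s ∈ l.foldl (fun subs x => subs ++ subs.map (fun s => s ++ [x])) acc ↔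
      ∃ u t, u ∈ acc ∧ t.Sublist l ∧ s = u ++ t := by
  induction l with
  | nil =>
    intro acc s
    simp only [List.foldl_nil]
    constructor
    · intro h; exact ⟨s, [], h, List.nil_sublist [], by simp⟩
    · rintro ⟨u, t, hu, ht, rfl⟩
      rw [List.sublist_nil.mp ht]
      simpa using hu
  | cons x xs ih =>
    intro acc s
    simp only [List.foldl_cons]
    rw [ih]
    constructor
    · rintro ⟨u, t, hu, ht, rfl⟩
      rcases List.mem_append.mp hu with hu | hu
      · exact ⟨u, t, hu, List.sublist_cons_iff.mpr (Or.inl ht), rfl⟩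
      · obtain ⟨u₀, hu₀, rfl⟩ := List.mem_map.mp hu
        exact ⟨u₀, x :: t, hu₀, List.sublist_cons_iff.mpr (Or.inr ⟨t, rfl, ht⟩), by simp⟩
    · rintro ⟨u, t, hu, ht, rfl⟩
      rcases List.sublist_cons_iff.mp ht with ht | ⟨r, rfl, hr⟩
      · exact ⟨u, t, List.mem_append.mpr (Or.inl hu), ht, rfl⟩
      · exact ⟨u ++ [x], r, List.mem_append.mpr (Or.inr (List.mem_map.mpr ⟨u, hu, rfl⟩)), hr,
          by simp⟩

lemma pvAny_congr_mem {α : Type} (l : List α) (p q : α → Bool)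
    (h : ∀ x ∈ l, p x = q x) : l.any p = l.any q := by
  induction l with
  | nil => rfl
  | cons a t ih =>
    simp only [List.any_cons, h a (by simp), ih (fun x hx => h x (by simp [hx]))]

lemma pvStepB_eq (w : PySem.Dict (List Int) Bool) (arr s : List Int)
    (hsound : pvSound w) (hsub : s.Sublist arr)
    (hkey : ∀ t : List Int, t.Sublist arr → t.length < s.length → (w.get? t).isSome) :
    pvStepB w s = w.insert s (pvWin s) := by
  unfold pvStepB
  by_cases hss : s = PySem.List.sorted s (fun x => x)
  · rw [if_pos hss, pvWin_eq, if_pos hss.symm]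
  · have hsne : ¬ PySem.List.sorted s (fun x => x) = s := fun h => hss h.symm
    have hnil : s ≠ [] := by
      intro h; subst h
      exact hss ((PySem.List.sorted_eq_nil_iff [] (fun x => x) false).mpr rfl).symm
    have h1 : 1 ≤ s.length := by
      cases s with
      | nil => exact absurd rfl hnil
      | cons a t => simp
    rw [if_neg hss, pvWin_eq, if_neg hsne]
    congr 1
    apply pvAny_congr_mem
    intro i hi
    have hi' : i < s.length := List.mem_range.mp hi
    rw [pvTemp_eq]
    have hcs : (s.eraseIdx i).Sublist arr := (List.eraseIdx_sublist s i).trans hsub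
    have hclen : (s.eraseIdx i).length < s.length := by
      have := List.length_eraseIdx (l := s) (i := i)
      rw [if_pos hi'] at this
      omega
    obtain ⟨b, hb⟩ := Option.isSome_iff_exists.mp (hkey _ hcs hclen)
    rw [PySem.Dict.getD_eq_get?_getD, hb, hsound _ b hb]
    rfl

lemma pvLoopB_spec (arr : List Int) : ∀ (rest : List (List Int)) (w : PySem.Dict (List Int) Bool),
    (∀ s ∈ rest, s.Sublist arr) →
    List.Pairwise (fun a b : List Int => ((a.length : Int) ≤ (b.length : Int))) rest →
    (∀ t : List Int, t.Sublist arr → t ∈ rest ∨ (w.get? t).isSome) →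
    pvSound w →
    pvSound (rest.foldl pvStepB w) ∧
      ∀ t : List Int, t.Sublist arr → ((rest.foldl pvStepB w).get? t).isSome := by
  intro rest
  induction rest with
  | nil =>
    intro w _ _ hall hsound
    exact ⟨hsound, fun t ht => (hall t ht).resolve_left (List.not_mem_nil)⟩
  | cons s rest ih =>
    intro w hsub hp hall hsound
    have hssub : s.Sublist arr := hsub s (by simp)
    obtain ⟨hp1, hp2⟩ := List.pairwise_cons.mp hp
    have hkey : ∀ t : List Int, t.Sublist arr → t.length < s.length → (w.get? t).isSome := by
      intro t ht hlen
      rcases hall t ht with hmem | hsome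
      · rcases List.mem_cons.mp hmem with rfl | hmem
        · omega
        · have := hp1 t hmem
          have : s.length ≤ t.length := by exact_mod_cast this
          omega
      · exact hsome
    simp only [List.foldl_cons]
    rw [pvStepB_eq w arr s hsound hssub hkey]
    apply ih
    · intro s' hs'; exact hsub s' (by simp [hs'])
    · exact hp2
    · intro t ht
      rcases hall t ht with hmem | hsome
      · rcases List.mem_cons.mp hmem with rfl | hmem
        · right; rw [PySem.Dict.get?_insert, if_pos rfl]; simp
        · left; exact hmem
      · right
        rw [PySem.Dict.get?_insert]
        split
        · simp
        · exact hsome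
    · exact pvSound_insert_win w s (pvWin s) hsound rfl

lemma pvB_eq_win (arr : List Int) :
    permutationGame_alt arr = if pvWin arr then "Alice" else "Bob" := by
  show (if ((PySem.List.sorted (arr.foldl (fun subs x => subs ++ subs.map (fun s => s ++ [x]))
      [([] : List Int)]) (fun s => (s.length : Int))).foldl pvStepB PySem.Dict.empty).getD arr false
      then "Alice" else "Bob") = _
  have hmem0 : ∀ s : List Int,
      s ∈ arr.foldl (fun subs x => subs ++ subs.map (fun s => s ++ [x])) [([] : List Int)] ↔
        s.Sublist arr := by
    intro s
    rw [pvSubs_mem]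
    constructor
    · rintro ⟨u, t, hu, ht, rfl⟩
      simp only [List.mem_singleton] at hu
      subst hu; simpa using ht
    · intro h; exact ⟨[], s, by simp, h, by simp⟩
  have hmem : ∀ s : List Int,
      s ∈ PySem.List.sorted (arr.foldl (fun subs x => subs ++ subs.map (fun s => s ++ [x]))
        [([] : List Int)]) (fun s => (s.length : Int)) ↔ s.Sublist arr := by
    intro s; rw [PySem.List.mem_sorted]; exact hmem0 s
  obtain ⟨hsound, hkeyed⟩ := pvLoopB_spec arr
    (PySem.List.sorted (arr.foldl (fun subs x => subs ++ subs.map (fun s => s ++ [x]))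
      [([] : List Int)]) (fun s => (s.length : Int)))
    PySem.Dict.empty
    (fun s hs => (hmem s).mp hs)
    (PySem.List.sorted_pairwise _ _)
    (fun t ht => Or.inl ((hmem t).mpr ht))
    (by intro k b hb; simp [PySem.Dict.get?_empty] at hb)
  obtain ⟨b, hb⟩ := Option.isSome_iff_exists.mp (hkeyed arr (List.Sublist.refl arr))
  have hbv : b = pvWin arr := hsound arr b hb
  rw [PySem.Dict.getD_eq_get?_getD, hb, hbv]
  rfl

-- ===== VERDICT (by name: the statement is the Claim_ definition above) =====
theorem permutationGame_spec : Claim_equal_permutationGame := by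
  intro arr _
  unfold Spec_permutationGame
  rw [pvA_eq_win, pvB_eq_win]
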